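-- pv_equiv track=rewrite | github.com/Vyvra/AoC2024 | day5/part1.py | check_order_is_correct
-- ===== SOURCE A (Python) =====
-- def check_order_is_correct(order, update):
--     first = order[0]
--     second = order[1]
--     if not (first in update and second in update):
--         return True
--     firstfound = False
--     for element in update:
--         if element == first:
--             firstfound = True
--         if element == second and not firstfound:
--             return False
--     return True
-- ===== SOURCE B (Python) =====
-- def check_order_is_correct(order, update):
--     first = order[0]
--     second = order[1]
--     if not (first in update and second in update):
--         return True
--     # compare first-occurrence positions; <= keeps first == second returning True
--     return update.index(first) <= update.index(second)
-- ===== Notes on version B (the rewrite author's own statement) =====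
-- stated objective: simpler
-- what changed: Replaces the flag-carrying scan with computing the two first-occurrence positions (list.index) and comparing them with <=.
import Mathlib
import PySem

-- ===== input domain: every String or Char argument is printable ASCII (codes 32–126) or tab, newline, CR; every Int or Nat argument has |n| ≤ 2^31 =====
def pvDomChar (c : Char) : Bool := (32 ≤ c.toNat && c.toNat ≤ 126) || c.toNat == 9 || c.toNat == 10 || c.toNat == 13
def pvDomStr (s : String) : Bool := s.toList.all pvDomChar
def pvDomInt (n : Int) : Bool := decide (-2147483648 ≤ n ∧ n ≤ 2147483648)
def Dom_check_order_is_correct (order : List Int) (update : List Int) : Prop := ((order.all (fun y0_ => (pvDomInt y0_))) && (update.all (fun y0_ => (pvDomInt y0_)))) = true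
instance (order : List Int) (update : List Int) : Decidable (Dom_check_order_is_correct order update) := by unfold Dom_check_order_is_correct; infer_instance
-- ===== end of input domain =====

-- B replaces A's flag-carrying scan by computing the two first-occurrence positions and comparing them (simpler decomposition).

-- ===== PORT A =====
-- A's for-loop with the firstfound flag and early 'return False'
def coicLoop (first second : Int) : List Int → Bool → Bool
  | [], _ => true
  | x :: xs, ff =>
      let ff' := if x == first then true else ff
      if x == second && !ff' then false else coicLoop first second xs ff'

def check_order_is_correct (order : List Int) (update : List Int) : Bool :=
  match PySem.List.pyGet? order 0, PySem.List.pyGet? order 1 with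
  | some first, some second =>
      if !(update.contains first && update.contains second) then true
      else coicLoop first second update false
  | _, _ => true   -- unreachable: Pre_ excludes inputs where Python raises IndexError

-- ===== PORT B =====
def check_order_is_correct_alt (order : List Int) (update : List Int) : Bool :=
  match PySem.List.pyGet? order 0 with
  | none => true   -- unreachable: Pre_ excludes inputs where Python raises IndexError
  | some first =>
    match PySem.List.pyGet? order 1 with
    | none => true   -- unreachable under Pre_
    | some second =>
      if !(update.contains first && update.contains second) then true
      else
        match PySem.List.index? update first with
        | none => true   -- unreachable: first is present
        | some i =>
          match PySem.List.index? update second with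
          | none => true   -- unreachable: second is present
          | some j => decide (i ≤ j)

-- ===== PRECONDITION & SPEC =====
-- A indexes order[0] and order[1]: Python raises IndexError when order has fewer than 2 elements.
def Pre_check_order_is_correct (order : List Int) (update : List Int) : Prop := 2 ≤ order.length
instance (order : List Int) (update : List Int) : Decidable (Pre_check_order_is_correct order update) := by unfold Pre_check_order_is_correct; infer_instance
def pvWitness_check_order_is_correct : List Int × List Int := ([1, 2], [1, 3, 2])

def Spec_check_order_is_correct (order : List Int) (update : List Int) (out : Bool) : Prop := out = check_order_is_correct_alt order update
instance (order : List Int) (update : List Int) (out : Bool) : Decidable (Spec_check_order_is_correct order update out) := by unfold Spec_check_order_is_correct; infer_instance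

-- ===== CLAIM (what is proved, stated in full; the proofs are below) =====
def Claim_equal_check_order_is_correct : Prop := ∀ (order : List Int) (update : List Int), Dom_check_order_is_correct order update → Pre_check_order_is_correct order update → Spec_check_order_is_correct order update (check_order_is_correct order update)

-- ===== LEMMAS AND PROOFS =====

-- once the flag is set, the loop can only return true
lemma coicLoop_true (f s : Int) (xs : List Int) : coicLoop f s xs true = true := by
  induction xs with
  | nil => rfl
  | cons x xs ih => simp [coicLoop, ih]

-- the loop with flag unset returns exactly "first position of f ≤ first position of s"
lemma coicLoop_eq_index (f s : Int) (xs : List Int) (i j : ℕ)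
    (hi : PySem.List.index? xs f = some i) (hj : PySem.List.index? xs s = some j) :
    coicLoop f s xs false = decide (i ≤ j) := by
  induction xs generalizing i j with
  | nil => simp [PySem.List.index?] at hi
  | cons x xs ih =>
    by_cases hxf : x = f
    · subst hxf
      rw [PySem.List.index?_cons_self] at hi
      cases hi
      simp [coicLoop, coicLoop_true]
    · rw [PySem.List.index?_cons_of_ne xs hxf] at hi
      cases hi' : PySem.List.index? xs f with
      | none => rw [hi'] at hi; simp at hi
      | some i' =>
        rw [hi'] at hi
        simp at hi
        by_cases hxs : x = s
        · subst hxs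
          rw [PySem.List.index?_cons_self] at hj
          cases hj
          simp [coicLoop, hxf]
          omega
        · rw [PySem.List.index?_cons_of_ne xs hxs] at hj
          cases hj' : PySem.List.index? xs s with
          | none => rw [hj'] at hj; simp at hj
          | some j' =>
            rw [hj'] at hj
            simp at hj
            rw [show coicLoop f s (x :: xs) false = coicLoop f s xs false by
                  simp [coicLoop, hxf, hxs]]
            rw [ih i' j' hi' hj']
            simp
            omega

-- ===== VERDICT (by name: the statement is the Claim_ definition above) =====
theorem check_order_is_correct_spec : Claim_equal_check_order_is_correct := by
  intro order update _ hpre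
  unfold Spec_check_order_is_correct
  match order, hpre with
  | f :: s :: rest, _ =>
    have e1 : PySem.List.pyGet? (f :: s :: rest) 0 = some f :=
      PySem.List.pyGet?_zero_cons f (s :: rest)
    have e2 : PySem.List.pyGet? (f :: s :: rest) 1 = some s := by
      rw [show (1 : Int) = ((0 : Nat) : Int) + 1 by norm_num,
        PySem.List.pyGet?_cons_succ]
      simp
    simp only [check_order_is_correct, check_order_is_correct_alt, e1, e2]
    by_cases hmem : f ∈ update ∧ s ∈ update
    · obtain ⟨hf, hs⟩ := hmem
      obtain ⟨i, hi⟩ := Option.isSome_iff_exists.mp ((PySem.List.index?_isSome_iff update f).mpr hf)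
      obtain ⟨j, hj⟩ := Option.isSome_iff_exists.mp ((PySem.List.index?_isSome_iff update s).mpr hs)
      have hl := coicLoop_eq_index f s update i j hi hj
      rw [PySem.List.index?_eq_idxOf?] at hi hj
      simp [hf, hs, hi, hj, hl]
    · rcases not_and_or.mp hmem with h | h <;> simp [h]
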